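-- pv_equiv track=rewrite | github.com/tongosu/ddonilang | tests/_ci_seamgrim_step_contract.py | merge_step_names
-- ===== SOURCE A (Python) =====
-- from typing import Iterable
--
-- def merge_step_names(base: Iterable[str], required: Iterable[str]) -> tuple[str, ...]:
--     out: list[str] = []
--     seen: set[str] = set()
--     for raw in base:
--         step = str(raw).strip()
--         if not step or step in seen:
--             continue
--         out.append(step)
--         seen.add(step)
--     for raw in required:
--         step = str(raw).strip()
--         if not step or step in seen:
--             continue
--         out.append(step)
--         seen.add(step)
--     return tuple(out)
-- ===== SOURCE B (Python) =====
-- def merge_step_names(base, required):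
--     # Peel-and-filter dedup: no seen-set, no membership test. Clean the whole
--     # stream once; then repeatedly move the head to the output and delete every
--     # later duplicate of it from the remainder, so uniqueness is enforced by
--     # filtering the tail rather than by checking a maintained structure.
--     cleaned = [s for s in (str(raw).strip() for raw in list(base) + list(required)) if s]
--     out = []
--     while cleaned:
--         head = cleaned[0]
--         out.append(head)
--         cleaned = [s for s in cleaned[1:] if s != head]
--     return tuple(out)
-- ===== Notes on version B (the rewrite author's own statement) =====
-- stated objective: alternative
-- what changed: Replaces the seen-set membership dedup with a peel-and-filter algorithm: clean the concatenated stream once, then repeatedly emit the head and filter all of its later duplicates out of the remainder, so no seen structure or membership branch exists at all.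
import Mathlib
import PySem

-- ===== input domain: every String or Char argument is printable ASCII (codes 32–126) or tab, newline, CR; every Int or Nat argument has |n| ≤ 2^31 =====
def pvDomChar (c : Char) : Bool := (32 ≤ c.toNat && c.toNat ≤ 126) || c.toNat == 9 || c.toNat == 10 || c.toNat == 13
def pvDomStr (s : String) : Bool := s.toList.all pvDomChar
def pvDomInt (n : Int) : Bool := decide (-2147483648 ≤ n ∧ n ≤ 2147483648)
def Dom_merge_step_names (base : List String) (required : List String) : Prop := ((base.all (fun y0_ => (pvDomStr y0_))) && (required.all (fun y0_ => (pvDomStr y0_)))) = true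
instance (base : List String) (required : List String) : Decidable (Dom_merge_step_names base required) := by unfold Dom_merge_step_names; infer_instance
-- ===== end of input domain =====

-- B replaces A's seen-set membership dedup by a peel-and-filter algorithm
-- (emit the head, filter its later duplicates out of the remainder);
-- objective: alternative algorithm, same results.

-- ===== PORT A =====
-- body of A's (identical) two loops: state = (out, seen)
def pvMergeBody (st : List String × PySem.Set String) (raw : String) :
    List String × PySem.Set String :=
  let step := PySem.Str.strip raw
  if step = "" ∨ PySem.Set.contains st.2 step then st
  else (st.1 ++ [step], PySem.Set.add st.2 step)

def merge_step_names (base : List String) (required : List String) : List String :=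
  (required.foldl pvMergeBody (base.foldl pvMergeBody ([], PySem.Set.empty))).1

-- ===== PORT B =====
-- the while loop of Source B: peel the head into out, filter it out of the rest
def pvPeel (cleaned : List String) (out : List String) : List String :=
  match cleaned with
  | [] => out
  | head :: rest => pvPeel (rest.filter (fun s => !(s == head))) (out ++ [head])
termination_by cleaned.length
decreasing_by
  have h1 := List.length_filter_le (fun x : {x // x ∈ rest} => !(x.1 == head)) rest.attach
  simp at h1 ⊢
  omega

def merge_step_names_alt (base : List String) (required : List String) : List String :=
  pvPeel (((base ++ required).map (fun raw => PySem.Str.strip raw)).filter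
    (fun s => !(s == ""))) []

-- ===== PRECONDITION & SPEC =====
def Spec_merge_step_names (base : List String) (required : List String) (out : List String) : Prop := out = merge_step_names_alt base required
instance (base : List String) (required : List String) (out : List String) : Decidable (Spec_merge_step_names base required out) := by unfold Spec_merge_step_names; infer_instance

-- ===== CLAIM (what is proved, stated in full; the proofs are below) =====
def Claim_equal_merge_step_names : Prop := ∀ (base : List String) (required : List String), Dom_merge_step_names base required → Spec_merge_step_names base required (merge_step_names base required)

-- ===== LEMMAS AND PROOFS =====

-- In A's loop the out-list and the seen-set hold exactly the same elements in the
-- same order, so the paired state stays of the form (o, o); its value is the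
-- Set.add-fold of the stripped, nonempty elements.
theorem pvMergeLoop_eq (xs : List String) (o : List String) :
    xs.foldl pvMergeBody (o, o) =
      (((xs.map (fun raw => PySem.Str.strip raw)).filter (fun s => !(s == ""))).foldl PySem.Set.add o,
       ((xs.map (fun raw => PySem.Str.strip raw)).filter (fun s => !(s == ""))).foldl PySem.Set.add o) := by
  induction xs generalizing o with
  | nil => rfl
  | cons x xs ih =>
    simp only [List.foldl_cons, List.map_cons, List.filter_cons]
    by_cases hs : PySem.Str.strip x = ""
    · simp [pvMergeBody, hs, ih]
    · by_cases hm : PySem.Str.strip x ∈ o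
      · simp [pvMergeBody, hs, hm, ih]
      · simp [pvMergeBody, PySem.Set.add, hs, hm, ih]

-- set(xs) commutes with filtering: discarding x after dedup = dedup after filtering x out
theorem pvOfList_filter (xs : List String) (x : String) :
    PySem.Set.discard (PySem.Set.ofList xs) x =
      PySem.Set.ofList (xs.filter (fun y => !(y == x))) := by
  induction xs generalizing x with
  | nil => rfl
  | cons y xs ih =>
    by_cases h : y = x
    · subst h
      simp [PySem.Set.ofList_cons, PySem.Set.discard, List.filter_filter, ← ih]
    · simp [PySem.Set.ofList_cons, PySem.Set.discard, List.filter_filter, h, ← ih]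
      congr 1
      funext a
      exact Bool.and_comm _ _

-- the peel loop computes out ++ first-occurrence dedup of the remainder
theorem pvPeel_eq (cleaned : List String) (out : List String) :
    pvPeel cleaned out = out ++ PySem.List.dedup cleaned := by
  induction cleaned, out using pvPeel.induct with
  | case1 out => simp [pvPeel]
  | case2 out head rest ih =>
    simp only [List.unattach_filter, List.unattach_attach] at ih
    rw [pvPeel, ih]
    simp [PySem.List.dedup_eq_ofList, PySem.Set.ofList_cons, pvOfList_filter]

-- ===== VERDICT (by name: the statement is the Claim_ definition above) =====
theorem merge_step_names_spec : Claim_equal_merge_step_names := by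
  intro base required _
  show merge_step_names base required = merge_step_names_alt base required
  unfold merge_step_names merge_step_names_alt
  have h0 : (([], PySem.Set.empty) : List String × PySem.Set String)
      = (([], []) : List String × List String) := rfl
  rw [h0, pvMergeLoop_eq base, pvMergeLoop_eq required, pvPeel_eq]
  simp [PySem.List.dedup_eq_ofList, PySem.Set.ofList_eq_foldl, List.filter_append,
    List.foldl_append]
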